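-- pv_equiv track=rewrite | github.com/himadriraj29/Python_DSA | Binary_Search_Tree/ceilingInLeftSideBST.py | ceilOnLeft
-- ===== SOURCE A (Python) =====
-- def ceilOnLeft(arr):
--     A = []
--     n = len(arr)
--     A.append(-1)
--     for i in range(n):
--         diff = float('inf')
--         for j in range(i):
--             if arr[j] >= arr[i]:
--                 diff = min(diff,arr[j] - arr[i])
--         if(diff == float('inf')):
--             A.append(-1)
--         else:
--             A.append(arr[i] + diff)
--     return A
-- ===== SOURCE B (Python) =====
-- def ceilOnLeft(arr):
--     res = [-1]
--     s = []  # sorted list of the elements seen so far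
--     for x in arr:
--         # hand-rolled bisect_left (A imports nothing, so no bisect module)
--         lo, hi = 0, len(s)
--         while lo < hi:
--             mid = (lo + hi) // 2
--             if s[mid] < x:
--                 lo = mid + 1
--             else:
--                 hi = mid
--         res.append(s[lo] if lo < len(s) else -1)
--         s.insert(lo, x)
--     return res
-- ===== Notes on version B (the rewrite author's own statement) =====
-- stated objective: faster
-- what changed: Instead of rescanning the whole prefix for every element (nested loops taking a running min of differences), B maintains a sorted list of the elements seen so far and finds the smallest earlier element >= arr[i] with a hand-written binary search, inserting each element at its sorted position.
import Mathlib
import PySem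

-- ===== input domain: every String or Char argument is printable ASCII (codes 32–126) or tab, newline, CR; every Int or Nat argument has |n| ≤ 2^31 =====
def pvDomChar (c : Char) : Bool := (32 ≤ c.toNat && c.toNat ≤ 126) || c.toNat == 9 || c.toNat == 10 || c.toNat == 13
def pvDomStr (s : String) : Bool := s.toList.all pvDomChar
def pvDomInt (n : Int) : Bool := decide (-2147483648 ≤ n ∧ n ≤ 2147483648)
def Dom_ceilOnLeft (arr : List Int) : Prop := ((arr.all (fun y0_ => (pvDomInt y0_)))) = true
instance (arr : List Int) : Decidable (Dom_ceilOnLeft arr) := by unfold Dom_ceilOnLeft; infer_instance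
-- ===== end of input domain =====

-- B replaces A's quadratic prefix rescans by a sorted list kept with binary-search
-- insertion (objective: faster); return values agree on every input.

-- ===== PORT A =====
-- the Option Int accumulator models A's float('inf') sentinel (none = inf, still infinite)
def ceilOnLeft (arr : List Int) : List Int :=
  (PySem.List.pyRange 0 (arr.length : Int) 1).foldl (fun A i =>
    match (PySem.List.pyRange 0 i 1).foldl (fun diff j =>
        if PySem.List.pyGetD arr j 0 ≥ PySem.List.pyGetD arr i 0 then
          some (match diff with
            | none => PySem.List.pyGetD arr j 0 - PySem.List.pyGetD arr i 0
            | some d => min d (PySem.List.pyGetD arr j 0 - PySem.List.pyGetD arr i 0))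
        else diff) none with
    | none => A ++ [-1]
    | some d => A ++ [PySem.List.pyGetD arr i 0 + d]) [-1]

-- ===== PORT B =====
-- the while-loop of Source B (hand-rolled bisect_left); the fuel hi - lo only bounds
-- the iteration count, the loop body is exactly Source B's
def bisectGo (s : List Int) (x : Int) : Nat → Nat → Nat → Nat
  | 0, lo, _hi => lo
  | fuel + 1, lo, hi =>
    if lo < hi then
      if s.getD ((lo + hi) / 2) 0 < x then bisectGo s x fuel ((lo + hi) / 2 + 1) hi
      else bisectGo s x fuel lo ((lo + hi) / 2)
    else lo

def bisectLo (s : List Int) (x : Int) (lo hi : Nat) : Nat :=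
  bisectGo s x (hi - lo) lo hi

-- one iteration of Source B's for-loop over (res, s)
def stepB (st : List Int × List Int) (x : Int) : List Int × List Int :=
  (st.1 ++ [if bisectLo st.2 x 0 st.2.length < st.2.length
            then st.2.getD (bisectLo st.2 x 0 st.2.length) 0 else -1],
   PySem.List.insert st.2 ((bisectLo st.2 x 0 st.2.length : Nat) : Int) x)

def ceilOnLeft_alt (arr : List Int) : List Int :=
  (arr.foldl stepB ([-1], [])).1

-- ===== PRECONDITION & SPEC =====
def Spec_ceilOnLeft (arr : List Int) (out : List Int) : Prop := out = ceilOnLeft_alt arr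
instance (arr : List Int) (out : List Int) : Decidable (Spec_ceilOnLeft arr out) := by unfold Spec_ceilOnLeft; infer_instance

-- ===== CLAIM (what is proved, stated in full; the proofs are below) =====
def Claim_equal_ceilOnLeft : Prop := ∀ (arr : List Int), Dom_ceilOnLeft arr → Spec_ceilOnLeft arr (ceilOnLeft arr)

-- ===== LEMMAS AND PROOFS =====

-- A's inner loop over the prefix, as a fold over the prefix's elements
def innerA (pref : List Int) (x : Int) : Option Int :=
  pref.foldl (fun diff a =>
    if a ≥ x then
      some (match diff with
        | none => a - x
        | some d => min d (a - x))
    else diff) none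

-- the common reference value: "smallest element of pref that is ≥ x, else -1"
def cval (pref : List Int) (x : Int) : Int :=
  match innerA pref x with
  | none => -1
  | some d => x + d

def refGo (pref l : List Int) : List Int :=
  match l with
  | [] => []
  | x :: t => cval pref x :: refGo (pref ++ [x]) t

-- "o is the minimum of the elements of l that are ≥ x (none if there are none)"
def IsMinGE (x : Int) (l : List Int) (o : Option Int) : Prop :=
  match o with
  | none => ∀ a ∈ l, a < x
  | some m => m ∈ l ∧ x ≤ m ∧ ∀ a ∈ l, x ≤ a → m ≤ a

theorem isMinGE_some (x : Int) (l : List Int) (m : Int) :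
    IsMinGE x l (some m) ↔ m ∈ l ∧ x ≤ m ∧ ∀ a ∈ l, x ≤ a → m ≤ a := Iff.rfl

theorem isMinGE_none (x : Int) (l : List Int) :
    IsMinGE x l none ↔ ∀ a ∈ l, a < x := Iff.rfl

theorem IsMinGE_unique {x : Int} {l : List Int} {o₁ o₂ : Option Int}
    (h₁ : IsMinGE x l o₁) (h₂ : IsMinGE x l o₂) : o₁ = o₂ := by
  match o₁, o₂ with
  | none, none => rfl
  | none, some m => exact absurd h₂.2.1 (by simpa using (h₁ m h₂.1).not_ge)
  | some m, none => exact absurd h₁.2.1 (by simpa using (h₂ m h₁.1).not_ge)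
  | some m₁, some m₂ =>
    have h12 := h₁.2.2 m₂ h₂.1 h₂.2.1
    have h21 := h₂.2.2 m₁ h₁.1 h₁.2.1
    simp; omega

theorem IsMinGE_perm {x : Int} {l l' : List Int} {o : Option Int}
    (hp : l.Perm l') (h : IsMinGE x l o) : IsMinGE x l' o := by
  match o with
  | none => intro a ha; exact h a (hp.mem_iff.mpr ha)
  | some m =>
    exact ⟨hp.mem_iff.mp h.1, h.2.1, fun a ha hx => h.2.2 a (hp.mem_iff.mpr ha) hx⟩

theorem minGE_extend_ge (x a : Int) (l : List Int) (m : Int) (hax : x ≤ a)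
    (h : IsMinGE x l (some m)) : IsMinGE x (l ++ [a]) (some (min m a)) := by
  rw [isMinGE_some] at h ⊢
  obtain ⟨hmem, hxm, hmin⟩ := h
  rcases le_total m a with hc | hc
  · rw [min_eq_left hc]
    exact ⟨List.mem_append.mpr (Or.inl hmem), hxm, fun b hb hxb => by
      rcases List.mem_append.mp hb with hb | hb
      · exact hmin b hb hxb
      · simp at hb; omega⟩
  · rw [min_eq_right hc]
    exact ⟨by simp, hax, fun b hb hxb => by
      rcases List.mem_append.mp hb with hb | hb
      · have := hmin b hb hxb; omega
      · simp at hb; omega⟩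

theorem innerA_append (pref : List Int) (x a : Int) :
    innerA (pref ++ [a]) x =
      (if a ≥ x then
        some (match innerA pref x with
          | none => a - x
          | some d => min d (a - x))
      else innerA pref x) := by
  simp [innerA, List.foldl_append]

theorem innerA_isMinGE (pref : List Int) (x : Int) :
    IsMinGE x pref ((innerA pref x).map (fun d => x + d)) := by
  induction pref using List.reverseRecOn with
  | nil => intro a ha; simp at ha
  | append_singleton l a ih =>
    rw [innerA_append]
    by_cases hax : a ≥ x
    · rw [if_pos hax]
      cases h : innerA l x with
      | none =>
        rw [h] at ih
        show IsMinGE x (l ++ [a]) (some (x + (a - x)))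
        rw [show x + (a - x) = a by ring, isMinGE_some]
        rw [Option.map_none, isMinGE_none] at ih
        refine ⟨by simp, hax, ?_⟩
        intro b hb hxb
        rcases List.mem_append.mp hb with hb | hb
        · have := ih b hb; omega
        · simp at hb; omega
      | some d =>
        rw [h] at ih
        rw [Option.map_some] at ih
        show IsMinGE x (l ++ [a]) (some (x + min d (a - x)))
        rw [show x + min d (a - x) = min (x + d) a by
          rcases le_total d (a - x) with hc | hc
          · rw [min_eq_left hc, min_eq_left (by omega)]
          · rw [min_eq_right hc, min_eq_right (by omega)]; ring]
        exact minGE_extend_ge x a l (x + d) hax ih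
    · rw [if_neg hax]
      cases h : innerA l x with
      | none =>
        rw [h] at ih
        rw [Option.map_none, isMinGE_none] at ih ⊢
        intro b hb
        rcases List.mem_append.mp hb with hb | hb
        · exact ih b hb
        · simp at hb; omega
      | some d =>
        rw [h] at ih
        rw [Option.map_some, isMinGE_some] at ih ⊢
        obtain ⟨hmem, hxm, hmin⟩ := ih
        refine ⟨List.mem_append.mpr (Or.inl hmem), hxm, ?_⟩
        intro b hb hxb
        rcases List.mem_append.mp hb with hb | hb
        · exact hmin b hb hxb
        · simp at hb; omega

theorem cval_eq_of_isMinGE {pref : List Int} {x : Int} {o : Option Int}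
    (h : IsMinGE x pref o) : cval pref x = o.getD (-1) := by
  have heq := IsMinGE_unique (innerA_isMinGE pref x) h
  unfold cval
  cases ho : innerA pref x with
  | none => rw [ho, Option.map_none] at heq; rw [← heq]; rfl
  | some d => rw [ho, Option.map_some] at heq; rw [← heq]; rfl

theorem refGo_append (p l : List Int) (y : Int) :
    refGo p (l ++ [y]) = refGo p l ++ [cval (p ++ l) y] := by
  induction l generalizing p with
  | nil => simp [refGo]
  | cons a t ih => simp [refGo, ih, List.append_assoc]

-- generic "append one value per element" fold
theorem foldl_app_map (g : Int → Int) :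
    ∀ (l : List Int) (acc : List Int),
      l.foldl (fun A i => A ++ [g i]) acc = acc ++ l.map g := by
  intro l
  induction l with
  | nil => simp
  | cons a t ih => intro acc; simp [List.foldl_cons, ih]

-- bridge: the for-j-in-range(len(xs)) inner loop reading xs[j] is a fold over xs
theorem inner_fold_take (xs : List Int) (x : Int) (init : Option Int) :
    (PySem.List.pyRange 0 (xs.length : Int) 1).foldl
      (fun diff j =>
        if PySem.List.pyGetD xs j 0 ≥ x then
          some (match diff with
            | none => PySem.List.pyGetD xs j 0 - x
            | some d => min d (PySem.List.pyGetD xs j 0 - x))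
        else diff) init
    = xs.foldl (fun diff a =>
        if a ≥ x then
          some (match diff with
            | none => a - x
            | some d => min d (a - x))
        else diff) init := by
  induction xs using List.reverseRecOn generalizing init with
  | nil => simp [PySem.List.pyRange_one_eq_nil]
  | append_singleton l y ih =>
    have hlen : (((l ++ [y]).length : Nat) : Int) = (l.length : Int) + 1 := by simp
    rw [hlen, PySem.List.pyRange_one_succ_right (by positivity), List.foldl_append,
      List.foldl_append]
    have hcongr : (PySem.List.pyRange 0 (l.length : Int) 1).foldl
        (fun diff j =>
          if PySem.List.pyGetD (l ++ [y]) j 0 ≥ x then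
            some (match diff with
              | none => PySem.List.pyGetD (l ++ [y]) j 0 - x
              | some d => min d (PySem.List.pyGetD (l ++ [y]) j 0 - x))
          else diff) init
      = (PySem.List.pyRange 0 (l.length : Int) 1).foldl
        (fun diff j =>
          if PySem.List.pyGetD l j 0 ≥ x then
            some (match diff with
              | none => PySem.List.pyGetD l j 0 - x
              | some d => min d (PySem.List.pyGetD l j 0 - x))
          else diff) init := by
      apply PySem.List.foldl_congr_mem
      intro acc j hj
      have hj' := (PySem.List.mem_pyRange_one).mp hj
      have hgj : PySem.List.pyGetD (l ++ [y]) j 0 = PySem.List.pyGetD l j 0 := by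
        rw [show j = ((j.toNat : Nat) : Int) by omega]
        rw [PySem.List.pyGetD_natCast, PySem.List.pyGetD_natCast]
        rw [List.getD_eq_getElem _ _ (by simp; omega)]
        rw [List.getD_eq_getElem _ _ (by omega)]
        rw [List.getElem_append_left (by omega)]
      rw [hgj]
    rw [hcongr, ih init]
    simp only [List.foldl_cons, List.foldl_nil]
    have hg : PySem.List.pyGetD (l ++ [y]) ((l.length : Nat) : Int) 0 = y := by
      rw [PySem.List.pyGetD_natCast]
      rw [List.getD_eq_getElem _ _ (by simp)]
      simp
    rw [hg]

-- ===== A side =====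

theorem inner_fold_eq_innerA (arr : List Int) (i : Nat) (hi : i ≤ arr.length) (x : Int) :
    (PySem.List.pyRange 0 (i : Int) 1).foldl (fun diff j =>
        if PySem.List.pyGetD arr j 0 ≥ x then
          some (match diff with
            | none => PySem.List.pyGetD arr j 0 - x
            | some d => min d (PySem.List.pyGetD arr j 0 - x))
        else diff) none = innerA (arr.take i) x := by
  have hlen : ((arr.take i).length : Int) = (i : Int) := by
    simp [List.length_take]; omega
  have hcongr : (PySem.List.pyRange 0 (i : Int) 1).foldl (fun diff j =>
        if PySem.List.pyGetD arr j 0 ≥ x then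
          some (match diff with
            | none => PySem.List.pyGetD arr j 0 - x
            | some d => min d (PySem.List.pyGetD arr j 0 - x))
        else diff) none
      = (PySem.List.pyRange 0 (i : Int) 1).foldl (fun diff j =>
        if PySem.List.pyGetD (arr.take i) j 0 ≥ x then
          some (match diff with
            | none => PySem.List.pyGetD (arr.take i) j 0 - x
            | some d => min d (PySem.List.pyGetD (arr.take i) j 0 - x))
        else diff) none := by
    apply PySem.List.foldl_congr_mem
    intro acc j hj
    have hj' := (PySem.List.mem_pyRange_one).mp hj
    have : PySem.List.pyGetD (arr.take i) j 0 = PySem.List.pyGetD arr j 0 := by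
      rw [show j = ((j.toNat : Nat) : Int) by omega]
      rw [PySem.List.pyGetD_natCast, PySem.List.pyGetD_natCast]
      rw [List.getD_eq_getElem _ _ (by simp [List.length_take]; omega)]
      rw [List.getD_eq_getElem _ _ (by omega)]
      simp
    rw [this]
  rw [hcongr, ← hlen]
  exact inner_fold_take (arr.take i) x none

theorem map_cval_eq_refGo (arr : List Int) :
    (PySem.List.pyRange 0 (arr.length : Int) 1).map
      (fun i => cval (arr.take i.toNat) (PySem.List.pyGetD arr i 0)) = refGo [] arr := by
  induction arr using List.reverseRecOn with
  | nil => simp [refGo, PySem.List.pyRange_one_eq_nil]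
  | append_singleton l y ih =>
    have hlen : (((l ++ [y]).length : Nat) : Int) = (l.length : Int) + 1 := by simp
    rw [hlen, PySem.List.pyRange_one_succ_right (by positivity), List.map_append]
    have hmap : (PySem.List.pyRange 0 (l.length : Int) 1).map
          (fun i => cval ((l ++ [y]).take i.toNat) (PySem.List.pyGetD (l ++ [y]) i 0))
        = (PySem.List.pyRange 0 (l.length : Int) 1).map
          (fun i => cval (l.take i.toNat) (PySem.List.pyGetD l i 0)) := by
      apply List.map_congr_left
      intro i hi
      have hi' := (PySem.List.mem_pyRange_one).mp hi
      have ht : (l ++ [y]).take i.toNat = l.take i.toNat := by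
        rw [List.take_append_of_le_length (by omega)]
      have hg : PySem.List.pyGetD (l ++ [y]) i 0 = PySem.List.pyGetD l i 0 := by
        rw [show i = ((i.toNat : Nat) : Int) by omega]
        rw [PySem.List.pyGetD_natCast, PySem.List.pyGetD_natCast]
        rw [List.getD_eq_getElem _ _ (by simp; omega)]
        rw [List.getD_eq_getElem _ _ (by omega)]
        rw [List.getElem_append_left (by omega)]
      rw [ht, hg]
    have hlast : cval ((l ++ [y]).take ((l.length : Int)).toNat)
          (PySem.List.pyGetD (l ++ [y]) (l.length : Int) 0) = cval l y := by
      have ht : (l ++ [y]).take ((l.length : Int)).toNat = l := by simp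
      have hg : PySem.List.pyGetD (l ++ [y]) (l.length : Int) 0 = y := by
        rw [show ((l.length : Nat) : Int) = ((l.length : Nat) : Int) from rfl,
          PySem.List.pyGetD_natCast]
        rw [List.getD_eq_getElem _ _ (by simp)]
        simp
      rw [ht, hg]
    rw [hmap, ih, List.map_singleton, hlast, refGo_append]
    simp

theorem portA_eq_refGo (arr : List Int) : ceilOnLeft arr = -1 :: refGo [] arr := by
  unfold ceilOnLeft
  have hfun : (fun (A : List Int) (i : Int) =>
      match (PySem.List.pyRange 0 i 1).foldl (fun diff j =>
          if PySem.List.pyGetD arr j 0 ≥ PySem.List.pyGetD arr i 0 then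
            some (match diff with
              | none => PySem.List.pyGetD arr j 0 - PySem.List.pyGetD arr i 0
              | some d => min d (PySem.List.pyGetD arr j 0 - PySem.List.pyGetD arr i 0))
          else diff) none with
      | none => A ++ [-1]
      | some d => A ++ [PySem.List.pyGetD arr i 0 + d])
      = fun (A : List Int) (i : Int) => A ++
        [match (PySem.List.pyRange 0 i 1).foldl (fun diff j =>
            if PySem.List.pyGetD arr j 0 ≥ PySem.List.pyGetD arr i 0 then
              some (match diff with
                | none => PySem.List.pyGetD arr j 0 - PySem.List.pyGetD arr i 0
                | some d => min d (PySem.List.pyGetD arr j 0 - PySem.List.pyGetD arr i 0))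
            else diff) none with
          | none => -1
          | some d => PySem.List.pyGetD arr i 0 + d] := by
    funext A i
    cases h : (PySem.List.pyRange 0 i 1).foldl (fun diff j =>
        if PySem.List.pyGetD arr j 0 ≥ PySem.List.pyGetD arr i 0 then
          some (match diff with
            | none => PySem.List.pyGetD arr j 0 - PySem.List.pyGetD arr i 0
            | some d => min d (PySem.List.pyGetD arr j 0 - PySem.List.pyGetD arr i 0))
        else diff) none <;> simp [h]
  rw [hfun, foldl_app_map]
  have hmap : (PySem.List.pyRange 0 (arr.length : Int) 1).map
      (fun (i : Int) =>
        match (PySem.List.pyRange 0 i 1).foldl (fun diff j =>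
            if PySem.List.pyGetD arr j 0 ≥ PySem.List.pyGetD arr i 0 then
              some (match diff with
                | none => PySem.List.pyGetD arr j 0 - PySem.List.pyGetD arr i 0
                | some d => min d (PySem.List.pyGetD arr j 0 - PySem.List.pyGetD arr i 0))
            else diff) none with
          | none => (-1 : Int)
          | some d => PySem.List.pyGetD arr i 0 + d)
      = (PySem.List.pyRange 0 (arr.length : Int) 1).map
        (fun i => cval (arr.take i.toNat) (PySem.List.pyGetD arr i 0)) := by
    apply List.map_congr_left
    intro i hi
    have hi' := (PySem.List.mem_pyRange_one).mp hi
    have hcast : ((i.toNat : Nat) : Int) = i := by omega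
    rw [show PySem.List.pyRange 0 i 1 = PySem.List.pyRange 0 ((i.toNat : Nat) : Int) 1 by
      rw [hcast]]
    rw [inner_fold_eq_innerA arr i.toNat (by omega) (PySem.List.pyGetD arr i 0)]
    cases h : innerA (arr.take i.toNat) (PySem.List.pyGetD arr i 0)
    · simp [cval, h]
    · simp [cval, h]
  rw [hmap, map_cval_eq_refGo]
  rfl

-- ===== B side =====

theorem bisectGo_spec (s : List Int) (x : Int) :
    ∀ (fuel lo hi : Nat), hi - lo ≤ fuel → lo ≤ hi → hi ≤ s.length →
    s.Pairwise (· ≤ ·) →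
    (∀ k, k < lo → ∀ h : k < s.length, s[k] < x) →
    (∀ k, hi ≤ k → ∀ h : k < s.length, x ≤ s[k]) →
    lo ≤ bisectGo s x fuel lo hi ∧ bisectGo s x fuel lo hi ≤ hi ∧
    (∀ k, k < bisectGo s x fuel lo hi → ∀ h : k < s.length, s[k] < x) ∧
    (∀ k, bisectGo s x fuel lo hi ≤ k → ∀ h : k < s.length, x ≤ s[k]) := by
  intro fuel
  induction fuel with
  | zero =>
    intro lo hi hf hle hhi hsort hlow hhigh
    simp only [bisectGo]
    exact ⟨le_refl _, by omega, hlow, fun k hk => hhigh k (by omega)⟩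
  | succ fuel ih =>
    intro lo hi hf hle hhi hsort hlow hhigh
    rw [bisectGo]
    by_cases h : lo < hi
    · rw [if_pos h]
      have hmid1 : lo ≤ (lo + hi) / 2 := by omega
      have hmid2 : (lo + hi) / 2 < hi := by omega
      have hmlen : (lo + hi) / 2 < s.length := by omega
      rw [List.getD_eq_getElem _ _ hmlen]
      have hpw := List.pairwise_iff_getElem.mp hsort
      by_cases hm : s[(lo + hi) / 2] < x
      · rw [if_pos hm]
        have hlow' : ∀ k, k < (lo + hi) / 2 + 1 → ∀ h : k < s.length, s[k] < x := by
          intro k hk hklen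
          rcases Nat.lt_or_ge k ((lo + hi) / 2) with hc | hc
          · exact lt_of_le_of_lt (hpw k _ hklen hmlen hc) hm
          · have : k = (lo + hi) / 2 := by omega
            subst this; exact hm
        obtain ⟨h1, h2, h3, h4⟩ := ih ((lo + hi) / 2 + 1) hi (by omega) (by omega)
          hhi hsort hlow' hhigh
        exact ⟨by omega, h2, h3, h4⟩
      · rw [if_neg hm]
        have hxm : x ≤ s[(lo + hi) / 2] := by omega
        have hhigh' : ∀ k, (lo + hi) / 2 ≤ k → ∀ h : k < s.length, x ≤ s[k] := by
          intro k hk hklen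
          rcases Nat.eq_or_lt_of_le hk with hc | hc
          · subst hc; exact hxm
          · exact le_trans hxm (hpw _ k hmlen hklen hc)
        obtain ⟨h1, h2, h3, h4⟩ := ih lo ((lo + hi) / 2) (by omega) (by omega)
          (by omega) hsort hlow hhigh'
        exact ⟨h1, by omega, h3, h4⟩
    · rw [if_neg h]
      exact ⟨le_refl _, by omega, hlow, fun k hk => hhigh k (by omega)⟩

theorem bisectLo_spec (s : List Int) (x : Int) :
    ∀ (lo hi : Nat), lo ≤ hi → hi ≤ s.length →
    s.Pairwise (· ≤ ·) →
    (∀ k, k < lo → ∀ h : k < s.length, s[k] < x) →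
    (∀ k, hi ≤ k → ∀ h : k < s.length, x ≤ s[k]) →
    lo ≤ bisectLo s x lo hi ∧ bisectLo s x lo hi ≤ hi ∧
    (∀ k, k < bisectLo s x lo hi → ∀ h : k < s.length, s[k] < x) ∧
    (∀ k, bisectLo s x lo hi ≤ k → ∀ h : k < s.length, x ≤ s[k]) := by
  intro lo hi hle hhi hsort hlow hhigh
  exact bisectGo_spec s x (hi - lo) lo hi (le_refl _) hle hhi hsort hlow hhigh

theorem isMinGE_of_bisect (s : List Int) (x : Int) (r : Nat)
    (hsort : s.Pairwise (· ≤ ·))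
    (hlow : ∀ k, k < r → ∀ h : k < s.length, s[k] < x)
    (hhigh : ∀ k, r ≤ k → ∀ h : k < s.length, x ≤ s[k]) :
    IsMinGE x s (if h : r < s.length then some s[r] else none) := by
  by_cases h : r < s.length
  · rw [dif_pos h, isMinGE_some]
    refine ⟨List.getElem_mem h, hhigh r (le_refl _) h, ?_⟩
    intro a ha hxa
    obtain ⟨k, hk, hka⟩ := List.mem_iff_getElem.mp ha
    rcases Nat.lt_or_ge k r with hc | hc
    · have := hlow k hc hk; omega
    · have hpw := List.pairwise_iff_getElem.mp hsort
      rcases Nat.eq_or_lt_of_le hc with hc' | hc'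
      · subst hc'; omega
      · have := hpw r k h hk hc'; omega
  · rw [dif_neg h, isMinGE_none]
    intro a ha
    obtain ⟨k, hk, hka⟩ := List.mem_iff_getElem.mp ha
    have := hlow k (by omega) hk; omega

theorem insert_sorted_perm (s : List Int) (x : Int) (r : Nat)
    (hr : r ≤ s.length)
    (hsort : s.Pairwise (· ≤ ·))
    (hlow : ∀ k, k < r → ∀ h : k < s.length, s[k] < x)
    (hhigh : ∀ k, r ≤ k → ∀ h : k < s.length, x ≤ s[k]) :
    (PySem.List.insert s ((r : Nat) : Int) x).Pairwise (· ≤ ·) ∧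
    (PySem.List.insert s ((r : Nat) : Int) x).Perm (x :: s) := by
  rw [PySem.List.insert_natCast s r x hr]
  constructor
  · rw [List.pairwise_append]
    refine ⟨hsort.take, ?_, ?_⟩
    · rw [List.pairwise_cons]
      refine ⟨?_, hsort.drop⟩
      intro a ha
      obtain ⟨k, hk, hka⟩ := List.mem_iff_getElem.mp ha
      have hklen : r + k < s.length := by
        have := hk; simp [List.length_drop] at this; omega
      rw [List.getElem_drop] at hka
      have := hhigh (r + k) (by omega) hklen
      omega
    · intro a ha b hb
      obtain ⟨k, hk, hka⟩ := List.mem_iff_getElem.mp ha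
      have hklen : k < s.length := by
        have := hk; simp [List.length_take] at this; omega
      have hkr : k < r := by
        have := hk; simp [List.length_take] at this; omega
      rw [List.getElem_take] at hka
      have hax : a < x := by have := hlow k hkr hklen; omega
      rcases List.mem_cons.mp hb with hb | hb
      · omega
      · obtain ⟨m, hm, hmb⟩ := List.mem_iff_getElem.mp hb
        have hmlen : r + m < s.length := by
          have := hm; simp [List.length_drop] at this; omega
        rw [List.getElem_drop] at hmb
        have := hhigh (r + m) (by omega) hmlen
        omega
  · calc (s.take r ++ x :: s.drop r).Perm (x :: (s.take r ++ s.drop r)) :=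
          List.perm_middle
      _ = x :: s := by rw [List.take_append_drop]

theorem portB_inv (arr : List Int) :
    (arr.foldl stepB ([-1], [])).1 = -1 :: refGo [] arr ∧
    (arr.foldl stepB ([-1], [])).2.Pairwise (· ≤ ·) ∧
    (arr.foldl stepB ([-1], [])).2.Perm arr := by
  induction arr using List.reverseRecOn with
  | nil => exact ⟨rfl, by simp, by simp⟩
  | append_singleton l y ih =>
    obtain ⟨hres, hsort, hperm⟩ := ih
    rw [List.foldl_append, List.foldl_cons, List.foldl_nil]
    set st := l.foldl stepB ([-1], []) with hst
    set r := bisectLo st.2 y 0 st.2.length with hrdef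
    obtain ⟨_, hrle, hlow, hhigh⟩ := bisectLo_spec st.2 y 0 st.2.length
      (by omega) (le_refl _) hsort (by omega) (by omega)
    have hmin := isMinGE_of_bisect st.2 y r hsort hlow hhigh
    have hminl : IsMinGE y l (if h : r < st.2.length then some st.2[r] else none) :=
      IsMinGE_perm hperm hmin
    have hval : (if r < st.2.length then st.2.getD r 0 else -1) = cval l y := by
      rw [cval_eq_of_isMinGE hminl]
      by_cases h : r < st.2.length
      · rw [if_pos h, dif_pos h, List.getD_eq_getElem _ _ h]; rfl
      · rw [if_neg h, dif_neg h]; rfl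
    obtain ⟨hs1, hs2⟩ := insert_sorted_perm st.2 y r hrle hsort hlow hhigh
    refine ⟨?_, hs1, hs2.trans ((hperm.cons y).trans (List.perm_append_singleton y l).symm)⟩
    show st.1 ++ [if r < st.2.length then st.2.getD r 0 else -1] = -1 :: refGo [] (l ++ [y])
    rw [hval, hres, refGo_append]
    simp

-- ===== VERDICT (by name: the statement is the Claim_ definition above) =====
theorem ceilOnLeft_spec : Claim_equal_ceilOnLeft := by
  intro arr _
  unfold Spec_ceilOnLeft
  rw [portA_eq_refGo]
  unfold ceilOnLeft_alt
  exact (portB_inv arr).1.symm
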